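-- pv_equiv track=rewrite | github.com/Misganaw-Berihun/LeetCode | 2024-maximize-the-confusion-of-an-exam/2024-maximize-the-confusion-of-an-exam.py | check
-- ===== SOURCE A (Python) =====
-- def check(prefix, window, k):
--     n = len(prefix)
--     for i in range(window, n):
--         num_trues = prefix[i] - prefix[i- window]
--         num_falses = window - num_trues
--
--         if num_trues <= k or num_falses <= k:
--             return True
--
--     return False
-- ===== SOURCE B (Python) =====
-- def check(prefix, window, k):
--     t = [prefix[i] - prefix[i - window] for i in range(window, len(prefix))]
--     if not t:
--         return False
--     return min(t) <= k or max(t) >= window - k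
-- ===== Notes on version B (the rewrite author's own statement) =====
-- stated objective: alternative
-- what changed: Replaces A's early-return scan testing each window with a build-then-aggregate pass: compute the list of window true-counts, then decide with a single min/max comparison (min(t)<=k or max(t)>=window-k).
-- outside the precondition, e.g. on check([0, 5], -1, 10): A returns True, B raises IndexError
import Mathlib
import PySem

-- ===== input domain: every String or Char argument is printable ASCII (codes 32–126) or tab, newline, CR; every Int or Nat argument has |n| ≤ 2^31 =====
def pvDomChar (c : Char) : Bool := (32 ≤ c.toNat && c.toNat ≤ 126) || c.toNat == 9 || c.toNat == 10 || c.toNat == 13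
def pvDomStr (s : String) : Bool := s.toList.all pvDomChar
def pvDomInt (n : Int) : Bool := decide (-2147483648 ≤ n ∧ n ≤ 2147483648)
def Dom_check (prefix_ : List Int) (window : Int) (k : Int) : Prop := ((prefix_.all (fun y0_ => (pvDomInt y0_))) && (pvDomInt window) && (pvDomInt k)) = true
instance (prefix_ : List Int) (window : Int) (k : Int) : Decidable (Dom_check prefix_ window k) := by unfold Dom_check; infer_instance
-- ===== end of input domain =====

-- B replaces A's early-return window scan with a build-then-aggregate pass (window counts list, then one min/max test); alternative decomposition, same cost.


-- ===== PORT A =====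
-- for i in range(window, n): early-return True on the first window passing the test
def checkLoop (prefix_ : List Int) (window : Int) (k : Int) : List Int → Bool
  | [] => false
  | i :: rest =>
    let numTrues := PySem.List.pyGetD prefix_ i 0 - PySem.List.pyGetD prefix_ (i - window) 0
    let numFalses := window - numTrues
    if numTrues ≤ k ∨ numFalses ≤ k then true else checkLoop prefix_ window k rest

def check (prefix_ : List Int) (window : Int) (k : Int) : Bool :=
  checkLoop prefix_ window k (PySem.List.pyRange window (prefix_.length : Int) 1)

-- ===== PORT B =====
def check_alt (prefix_ : List Int) (window : Int) (k : Int) : Bool :=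
  let t := (PySem.List.pyRange window (prefix_.length : Int) 1).map
    (fun i => PySem.List.pyGetD prefix_ i 0 - PySem.List.pyGetD prefix_ (i - window) 0)
  if t = [] then false
  else
    match PySem.List.min? t (fun x => x), PySem.List.max? t (fun x => x) with
    | some m, some M => decide (m ≤ k) || decide (window - k ≤ M)
    | _, _ => false

-- ===== PRECONDITION & SPEC =====
-- Pre_ restricts window to the natural domain (a nonnegative window size): for window < 0 Python A
-- either raises IndexError or returns via negative-index wraparound mid-scan, and B itself raises there.
def Pre_check (prefix_ : List Int) (window : Int) (k : Int) : Prop := 0 ≤ window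
instance (prefix_ : List Int) (window : Int) (k : Int) : Decidable (Pre_check prefix_ window k) := by unfold Pre_check; infer_instance
def pvWitness_check : List Int × Int × Int := ([0, 1, 1, 2], 2, 1)
def Spec_check (prefix_ : List Int) (window : Int) (k : Int) (out : Bool) : Prop := out = check_alt prefix_ window k
instance (prefix_ : List Int) (window : Int) (k : Int) (out : Bool) : Decidable (Spec_check prefix_ window k out) := by unfold Spec_check; infer_instance

-- ===== CLAIM (what is proved, stated in full; the proofs are below) =====
def Claim_equal_check : Prop := ∀ (prefix_ : List Int) (window : Int) (k : Int), Dom_check prefix_ window k → Pre_check prefix_ window k → Spec_check prefix_ window k (check prefix_ window k)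

-- ===== LEMMAS AND PROOFS =====

theorem checkLoop_iff (prefix_ : List Int) (window k : Int) (l : List Int) :
    checkLoop prefix_ window k l = true ↔
      ∃ i ∈ l, (PySem.List.pyGetD prefix_ i 0 - PySem.List.pyGetD prefix_ (i - window) 0 ≤ k ∨
        window - (PySem.List.pyGetD prefix_ i 0 - PySem.List.pyGetD prefix_ (i - window) 0) ≤ k) := by
  induction l with
  | nil => simp [checkLoop]
  | cons i rest ih =>
    simp only [checkLoop, List.mem_cons]
    split_ifs with h
    · constructor
      · intro _; exact ⟨i, Or.inl rfl, h⟩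
      · intro _; rfl
    · rw [ih]
      constructor
      · rintro ⟨j, hj, hc⟩; exact ⟨j, Or.inr hj, hc⟩
      · rintro ⟨j, hj, hc⟩
        rcases hj with rfl | hj
        · exact absurd hc h
        · exact ⟨j, hj, hc⟩

theorem check_eq_alt (prefix_ : List Int) (window k : Int) :
    check prefix_ window k = check_alt prefix_ window k := by
  unfold check check_alt
  generalize PySem.List.pyRange window (prefix_.length : Int) 1 = l
  show checkLoop prefix_ window k l =
    (let t := l.map (fun i => PySem.List.pyGetD prefix_ i 0 - PySem.List.pyGetD prefix_ (i - window) 0)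
     if t = [] then false
     else
       match PySem.List.min? t (fun x => x), PySem.List.max? t (fun x => x) with
       | some m, some M => decide (m ≤ k) || decide (window - k ≤ M)
       | _, _ => false)
  simp only []
  set f : Int → Int := fun i => PySem.List.pyGetD prefix_ i 0 - PySem.List.pyGetD prefix_ (i - window) 0 with hf
  rcases hn : l.map f with _ | ⟨x, t⟩
  · have hl0 : l = [] := List.map_eq_nil_iff.mp hn
    simp [hl0, checkLoop]
  · have hne : l.map f ≠ [] := by simp [hn]
    have hlne : l ≠ [] := by intro h; simp [h] at hn
    rcases hm : PySem.List.min? (x :: t) (fun x => x) with _ | m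
    · exact absurd ((PySem.List.min?_eq_none_iff _ _).mp hm) (by simp)
    rcases hM : PySem.List.max? (x :: t) (fun x => x) with _ | M
    · exact absurd ((PySem.List.max?_eq_none_iff _ _).mp hM) (by simp)
    rw [if_neg (List.cons_ne_nil x t)]
    show _ = (decide (m ≤ k) || decide (window - k ≤ M))
    have hmmem : m ∈ x :: t := PySem.List.min?_mem hm
    have hMmem : M ∈ x :: t := PySem.List.max?_mem hM
    have hmmin : ∀ y ∈ x :: t, m ≤ y := PySem.List.min?_isMin hm
    have hMmax : ∀ y ∈ x :: t, y ≤ M := PySem.List.max?_isMax hM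
    have key : checkLoop prefix_ window k l = true ↔ (m ≤ k ∨ window - k ≤ M) := by
      rw [checkLoop_iff]
      constructor
      · rintro ⟨i, hi, hc⟩
        have hfl : f i ∈ x :: t := by rw [← hn]; exact List.mem_map_of_mem hi
        rcases hc with hc | hc
        · exact Or.inl (le_trans (hmmin _ hfl) hc)
        · exact Or.inr (le_trans (by simp only [hf]; omega) (hMmax _ hfl))
      · rintro (hc | hc)
        · have : m ∈ l.map f := by rw [hn]; exact hmmem
          rcases List.mem_map.mp this with ⟨i, hi, hfi⟩
          refine ⟨i, hi, Or.inl ?_⟩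
          simp only [hf] at hfi
          omega
        · have : M ∈ l.map f := by rw [hn]; exact hMmem
          rcases List.mem_map.mp this with ⟨i, hi, hfi⟩
          refine ⟨i, hi, Or.inr ?_⟩
          simp only [hf] at hfi
          omega
    cases h : checkLoop prefix_ window k l with
    | true =>
      rcases key.mp h with hc | hc
      · simp [hc]
      · simp [hc]
    | false =>
      have : ¬ (m ≤ k ∨ window - k ≤ M) := fun hc => by rw [key.mpr hc] at h; exact Bool.noConfusion h
      push_neg at this
      simp [not_le.mpr this.1, not_le.mpr this.2]

-- ===== VERDICT (by name: the statement is the Claim_ definition above) =====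
theorem check_spec : Claim_equal_check := by
  intro prefix_ window k _ _
  unfold Spec_check
  exact check_eq_alt prefix_ window k
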